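-- pv_equiv track=rewrite | github.com/bssrdf/pyleet | CheckifWordCanBePlacedInCrossword.py | placeWordInCrossword2
-- ===== SOURCE A (Python) =====
-- from typing import List
--
-- def placeWordInCrossword2(board: List[List[str]], word: str) -> bool:
--     words=[word,word[::-1]]
--     n=len(word)
--     for B in board,zip(*board):
--         for row in B:
--             q=''.join(row).split('#')
--             for w in words:
--                 for s in q:
--                     if len(s)==n:
--                         if all(s[i]==w[i] or s[i]==' ' for i in range(n)):
--                             return True
--     return False
-- ===== SOURCE B (Python) =====
-- def placeWordInCrossword2(board, word):
--     n = len(word)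
--     rev = word[::-1]
--     lines = [''.join(r) for r in board] + [''.join(c) for c in zip(*board)]
--     for s in lines:
--         L = len(s)
--         for i in range(L - n + 1):
--             if i > 0 and s[i - 1] != '#':
--                 continue
--             if i + n < L and s[i + n] != '#':
--                 continue
--             for w in (word, rev):
--                 if all(s[i + j] != '#' and (s[i + j] == ' ' or s[i + j] == w[j]) for j in range(n)):
--                     return True
--     return False
-- ===== Notes on version B (the rewrite author's own statement) =====
-- stated objective: alternative
-- what changed: Instead of joining each line and splitting it on '#' into segments to compare whole segments against the word, B scans each joined line index by index, accepting a start position that is '#'/edge-bounded on both sides and whose n cells each match the word (or its reverse) or are a space wildcard.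
import Mathlib
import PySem

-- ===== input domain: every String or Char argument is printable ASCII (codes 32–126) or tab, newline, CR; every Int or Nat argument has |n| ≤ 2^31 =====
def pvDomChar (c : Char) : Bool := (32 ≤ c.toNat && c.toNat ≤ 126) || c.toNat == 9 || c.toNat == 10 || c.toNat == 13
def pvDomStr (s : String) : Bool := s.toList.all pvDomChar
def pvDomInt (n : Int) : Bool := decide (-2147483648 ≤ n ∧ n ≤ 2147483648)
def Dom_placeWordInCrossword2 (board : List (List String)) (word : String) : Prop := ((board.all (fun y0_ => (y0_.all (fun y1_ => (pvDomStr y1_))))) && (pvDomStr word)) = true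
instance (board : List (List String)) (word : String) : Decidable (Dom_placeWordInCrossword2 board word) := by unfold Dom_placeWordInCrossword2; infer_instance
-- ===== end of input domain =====

-- B scans each joined line index by index with '#'/edge boundary tests instead of A's
-- splitting of each line on '#' and comparing whole segments (objective: alternative).

-- shared helpers: ''.join(row) and zip(*board) (both Pythons perform exactly these calls)
def pvJoinRow (row : List String) : List Char := PySem.Chars.join [] (row.map String.toList)

-- zip(*board), ported by hand: columns up to the shortest row (exact: Python zip truncates)
def pvZipStar (rows : List (List String)) : List (List String) :=
  match rows with
  | [] => []
  | r :: rs =>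
    (List.range (rs.foldl (fun m l => min m l.length) r.length)).map
      (fun j => (r :: rs).map (fun row => row.getD j ""))

-- ===== PORT A =====
def placeWordInCrossword2 (board : List (List String)) (word : String) : Bool :=
  let wl := word.toList
  let words := [wl, (PySem.List.slice? wl none none (-1)).getD []]
  let n := wl.length
  [board, pvZipStar board].any fun Bd =>
    Bd.any fun row =>
      let q := PySem.Chars.splitOn (pvJoinRow row) ['#']
      words.any fun w =>
        q.any fun s =>
          s.length == n &&
          (List.range n).all fun i => (s.getD i ' ' == w.getD i ' ' || s.getD i ' ' == ' ')

-- ===== PORT B =====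
def placeWordInCrossword2_alt (board : List (List String)) (word : String) : Bool :=
  let wl := word.toList
  let n := wl.length
  let rev := (PySem.List.slice? wl none none (-1)).getD []
  let lines := board.map pvJoinRow ++ (pvZipStar board).map pvJoinRow
  lines.any fun s =>
    let L := s.length
    (PySem.List.pyRange 0 ((L : Int) - n + 1) 1).any fun i =>
      (decide (i = 0) || PySem.List.pyGetD s (i - 1) ' ' == '#') &&
      ((decide (i + n = (L : Int)) || PySem.List.pyGetD s (i + n) ' ' == '#') &&
      ([wl, rev].any fun w =>
        (List.range n).all fun j =>
          let c := PySem.List.pyGetD s (i + (j : Int)) ' '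
          c != '#' && (c == ' ' || c == w.getD j ' ')))

-- ===== PRECONDITION & SPEC =====
def Spec_placeWordInCrossword2 (board : List (List String)) (word : String) (out : Bool) : Prop := out = placeWordInCrossword2_alt board word
instance (board : List (List String)) (word : String) (out : Bool) : Decidable (Spec_placeWordInCrossword2 board word out) := by unfold Spec_placeWordInCrossword2; infer_instance

-- ===== CLAIM (what is proved, stated in full; the proofs are below) =====
def Claim_equal_placeWordInCrossword2 : Prop := ∀ (board : List (List String)) (word : String), Dom_placeWordInCrossword2 board word → Spec_placeWordInCrossword2 board word (placeWordInCrossword2 board word)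

-- ===== LEMMAS AND PROOFS =====

def splitH : List Char → List (List Char)
  | [] => [[]]
  | c :: rest => if c = '#' then [] :: splitH rest else (splitH rest).modifyHead (c :: ·)

lemma splitH_ne_nil (s : List Char) : splitH s ≠ [] := by
  induction s with
  | nil => simp [splitH]
  | cons c rest ih =>
    simp only [splitH]
    split
    · simp
    · cases h : splitH rest with
      | nil => exact absurd h ih
      | cons a t => simp [h, List.modifyHead]

lemma go_eq (fuel : Nat) (l cur : List Char) (acc : List (List Char)) (h : l.length < fuel) :
    PySem.Chars.splitOn.go ['#'] fuel l cur acc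
      = acc.reverse ++ (splitH l).modifyHead (cur.reverse ++ ·) := by
  induction fuel generalizing l cur acc with
  | zero => omega
  | succ f ih =>
    cases l with
    | nil =>
      simp [PySem.Chars.splitOn.go, splitH]
    | cons c rest =>
      rw [PySem.Chars.splitOn.go]
      by_cases hc : c = '#'
      · subst hc
        have hpre : List.isPrefixOf ['#'] ('#' :: rest) = true := by simp [List.isPrefixOf]
        simp only [hpre, if_true, List.length_cons, List.length_nil, List.drop_succ_cons, List.drop_zero]
        rw [ih rest [] (cur.reverse :: acc) (by simp at h; omega)]
        cases hs : splitH rest with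
        | nil => exact absurd hs (splitH_ne_nil rest)
        | cons a t =>
          simp [splitH, hs, List.modifyHead]
      · have hpre : List.isPrefixOf ['#'] (c :: rest) = false := by
          simp [List.isPrefixOf]; intro hcc; exact hc hcc.symm
        simp only [hpre, if_false, Bool.false_eq_true]
        rw [ih rest (c :: cur) acc (by simp at h; omega)]
        cases hs : splitH rest with
        | nil => exact absurd hs (splitH_ne_nil rest)
        | cons a t =>
          simp [splitH, hs, hc, List.modifyHead]

lemma splitOn_eq_splitH (s : List Char) :
    PySem.Chars.splitOn s ['#'] = splitH s := by
  have := go_eq (s.length + 1) s [] [] (by omega)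
  rw [PySem.Chars.splitOn]
  rw [this]
  simp
  cases hs : splitH s with
  | nil => exact absurd hs (splitH_ne_nil s)
  | cons a t => simp [List.modifyHead]

def MA (n : Nat) (w seg : List Char) : Prop :=
  seg.length = n ∧ ∀ i < n, seg.getD i ' ' = w.getD i ' ' ∨ seg.getD i ' ' = ' '

def AOK (s : List Char) (ws : List (List Char)) (n : Nat) : Prop :=
  ∃ w ∈ ws, ∃ seg ∈ splitH s, MA n w seg

def BOK (s : List Char) (ws : List (List Char)) (n : Nat) : Prop :=
  ∃ k : Nat, k + n ≤ s.length ∧ (k = 0 ∨ s.getD (k - 1) ' ' = '#') ∧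
    (k + n = s.length ∨ s.getD (k + n) ' ' = '#') ∧
    ∃ w ∈ ws, ∀ j < n, s.getD (k + j) ' ' ≠ '#' ∧
      (s.getD (k + j) ' ' = ' ' ∨ s.getD (k + j) ' ' = w.getD j ' ')

lemma no_hash_getD {s : List Char} (h : '#' ∉ s) {j : Nat} (hj : j < s.length) :
    s.getD j ' ' ≠ '#' := by
  rw [List.getD_eq_getElem s ' ' hj]
  intro he
  exact h (he ▸ List.getElem_mem hj)

lemma splitH_no_hash {s : List Char} (h : '#' ∉ s) : splitH s = [s] := by
  induction s with
  | nil => rfl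
  | cons c rest ih =>
    simp only [List.mem_cons, not_or] at h
    simp [splitH, Ne.symm h.1, ih h.2, List.modifyHead]

lemma splitH_hash {a : List Char} (t : List Char) (h : '#' ∉ a) :
    splitH (a ++ '#' :: t) = a :: splitH t := by
  induction a with
  | nil => simp [splitH]
  | cons c rest ih =>
    simp only [List.mem_cons, not_or] at h
    simp [splitH, Ne.symm h.1, ih h.2, List.modifyHead]

lemma exists_hash_split {s : List Char} (hs : '#' ∈ s) :
    ∃ a t, s = a ++ '#' :: t ∧ '#' ∉ a := by
  induction s with
  | nil => simp at hs
  | cons c rest ih =>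
    by_cases hc : c = '#'
    · exact ⟨[], rest, by simp [hc], by simp⟩
    · have : '#' ∈ rest := by
        rcases List.mem_cons.mp hs with h | h
        · exact absurd h.symm hc
        · exact h
      obtain ⟨a, t, he, hna⟩ := ih this
      exact ⟨c :: a, t, by simp [he], by simp [hna]; exact fun h => hc h.symm⟩

lemma getD_mid (a t : List Char) : (a ++ '#' :: t).getD a.length ' ' = '#' := by
  rw [List.getD_append_right _ _ _ _ (le_refl _)]
  simp

lemma getD_right (a t : List Char) {i : Nat} (hi : a.length + 1 ≤ i) :
    (a ++ '#' :: t).getD i ' ' = t.getD (i - (a.length + 1)) ' ' := by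
  rw [List.getD_append_right _ _ _ _ (by omega)]
  have : i - a.length = (i - (a.length + 1)) + 1 := by omega
  rw [this, List.getD_cons_succ]

lemma BOK_hash {a : List Char} (t : List Char) (ws : List (List Char)) (n : Nat) (h : '#' ∉ a) :
    BOK (a ++ '#' :: t) ws n ↔
      (a.length = n ∧ ∃ w ∈ ws, ∀ i < n, a.getD i ' ' = ' ' ∨ a.getD i ' ' = w.getD i ' ') ∨
      BOK t ws n := by
  have hlen : (a ++ '#' :: t).length = a.length + 1 + t.length := by simp; omega
  constructor
  · rintro ⟨k, hk, hl, hr, w, hw, hm⟩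
    rcases lt_trichotomy (k + n) a.length with hc | hc | hc
    · -- window strictly inside a, right bound forces s[k+n]='#' which lies in a: contradiction
      exfalso
      rcases hr with hr | hr
      · omega
      · rw [List.getD_append _ _ _ _ (by omega)] at hr
        exact no_hash_getD h (by omega) hr
    · -- k + n = a.length: left bound forces k = 0, hence n = a.length
      have hk0 : k = 0 := by
        rcases hl with hl | hl
        · exact hl
        rcases Nat.eq_zero_or_pos k with h0 | h0
        · exact h0
        exfalso
        rw [List.getD_append _ _ _ _ (by omega)] at hl
        exact no_hash_getD h (by omega) hl
      left
      refine ⟨by omega, w, hw, fun i hi => ?_⟩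
      have := (hm i hi).2
      rw [hk0, Nat.zero_add, List.getD_append _ _ _ _ (by omega)] at this
      exact this
    · -- k + n > a.length
      by_cases hka : k ≤ a.length
      · -- window crosses the '#'
        exfalso
        have hj : a.length - k < n := by omega
        have := (hm _ hj).1
        have heq : k + (a.length - k) = a.length := by omega
        rw [heq, getD_mid] at this
        exact this rfl
      · -- window inside t
        right
        refine ⟨k - (a.length + 1), by omega, ?_, ?_, w, hw, fun j hj => ?_⟩
        · rcases hl with hl | hl
          · omega
          · by_cases hk1 : k = a.length + 1
            · left; omega
            · right
              rw [getD_right a t (by omega)] at hl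
              have : k - 1 - (a.length + 1) = k - (a.length + 1) - 1 := by omega
              rwa [this] at hl
        · rcases hr with hr | hr
          · left; omega
          · right
            rw [getD_right a t (by omega)] at hr
            have : k + n - (a.length + 1) = k - (a.length + 1) + n := by omega
            rwa [this] at hr
        · have := hm j hj
          rw [getD_right a t (by omega)] at this
          have heq : k + j - (a.length + 1) = k - (a.length + 1) + j := by omega
          rwa [heq] at this
  · rintro (⟨hn, w, hw, hm⟩ | ⟨k, hk, hl, hr, w, hw, hm⟩)
    · refine ⟨0, by omega, Or.inl rfl, ?_, w, hw, fun j hj => ?_⟩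
      · right
        rw [Nat.zero_add, ← hn, getD_mid]
      · rw [Nat.zero_add, List.getD_append _ _ _ _ (by omega)]
        exact ⟨no_hash_getD h (by omega), hm j hj⟩
    · refine ⟨k + (a.length + 1), by omega, ?_, ?_, w, hw, fun j hj => ?_⟩
      · right
        by_cases hk0 : k = 0
        · have : k + (a.length + 1) - 1 = a.length := by omega
          rw [this, getD_mid]
        · rw [getD_right a t (by omega)]
          have : k + (a.length + 1) - 1 - (a.length + 1) = k - 1 := by omega
          rw [this]
          rcases hl with hl | hl
          · exact absurd hl hk0
          · exact hl
      · rcases hr with hr | hr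
        · left; omega
        · right
          rw [getD_right a t (by omega)]
          have : k + (a.length + 1) + n - (a.length + 1) = k + n := by omega
          rw [this]; exact hr
      · rw [getD_right a t (by omega)]
        have : k + (a.length + 1) + j - (a.length + 1) = k + j := by omega
        rw [this]
        exact hm j hj

lemma BOK_no_hash {s : List Char} (ws : List (List Char)) (n : Nat) (h : '#' ∉ s) :
    BOK s ws n ↔
      (s.length = n ∧ ∃ w ∈ ws, ∀ i < n, s.getD i ' ' = ' ' ∨ s.getD i ' ' = w.getD i ' ') := by
  constructor
  · rintro ⟨k, hk, hl, hr, w, hw, hm⟩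
    have hk0 : k = 0 := by
      rcases hl with hl | hl
      · exact hl
      rcases Nat.eq_zero_or_pos k with h0 | h0
      · exact h0
      exact absurd hl (no_hash_getD h (by omega))
    have hn : s.length = n := by
      rcases hr with hr | hr
      · omega
      rcases Nat.lt_or_ge (k + n) s.length with h0 | h0
      · exact absurd hr (no_hash_getD h h0)
      · omega
    refine ⟨hn, w, hw, fun i hi => ?_⟩
    have := (hm i hi).2
    rwa [hk0, Nat.zero_add] at this
  · rintro ⟨hn, w, hw, hm⟩
    exact ⟨0, by omega, Or.inl rfl, Or.inl (by omega), w, hw,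
      fun j hj => ⟨no_hash_getD h (by omega), by simpa using hm j hj⟩⟩

lemma AOK_no_hash {s : List Char} (ws : List (List Char)) (n : Nat) (h : '#' ∉ s) :
    AOK s ws n ↔
      (s.length = n ∧ ∃ w ∈ ws, ∀ i < n, s.getD i ' ' = ' ' ∨ s.getD i ' ' = w.getD i ' ') := by
  rw [AOK]
  simp only [splitH_no_hash h, List.mem_singleton]
  constructor
  · rintro ⟨w, hw, seg, rfl, hlen, hm⟩
    exact ⟨hlen, w, hw, fun i hi => (hm i hi).symm⟩
  · rintro ⟨hlen, w, hw, hm⟩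
    exact ⟨w, hw, s, rfl, hlen, fun i hi => (hm i hi).symm⟩

lemma AOK_hash {a : List Char} (t : List Char) (ws : List (List Char)) (n : Nat) (h : '#' ∉ a) :
    AOK (a ++ '#' :: t) ws n ↔
      (a.length = n ∧ ∃ w ∈ ws, ∀ i < n, a.getD i ' ' = ' ' ∨ a.getD i ' ' = w.getD i ' ') ∨
      AOK t ws n := by
  rw [AOK]
  simp only [splitH_hash t h, List.mem_cons]
  constructor
  · rintro ⟨w, hw, seg, (rfl | hseg), hlen, hm⟩
    · exact Or.inl ⟨hlen, w, hw, fun i hi => (hm i hi).symm⟩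
    · exact Or.inr ⟨w, hw, seg, hseg, hlen, hm⟩
  · rintro (⟨hlen, w, hw, hm⟩ | ⟨w, hw, seg, hseg, hlen, hm⟩)
    · exact ⟨w, hw, a, Or.inl rfl, hlen, fun i hi => (hm i hi).symm⟩
    · exact ⟨w, hw, seg, Or.inr hseg, hlen, hm⟩

lemma AOK_iff_BOK_aux (N : Nat) : ∀ (s : List Char), s.length ≤ N →
    ∀ (ws : List (List Char)) (n : Nat), (AOK s ws n ↔ BOK s ws n) := by
  induction N with
  | zero =>
    intro s hs ws n
    have hnil : s = [] := List.length_eq_zero_iff.mp (by omega)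
    subst hnil
    rw [AOK_no_hash ws n (by simp), BOK_no_hash ws n (by simp)]
  | succ N ih =>
    intro s hs ws n
    by_cases hmem : '#' ∈ s
    · obtain ⟨a, t, rfl, hna⟩ := exists_hash_split hmem
      have ht : t.length ≤ N := by simp at hs; omega
      rw [AOK_hash t ws n hna, BOK_hash t ws n hna, ih t ht ws n]
    · rw [AOK_no_hash ws n hmem, BOK_no_hash ws n hmem]

lemma AOK_iff_BOK (s : List Char) (ws : List (List Char)) (n : Nat) :
    AOK s ws n ↔ BOK s ws n :=
  AOK_iff_BOK_aux s.length s (le_refl _) ws n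

def lineA (s : List Char) (ws : List (List Char)) (n : Nat) : Bool :=
  ws.any fun w => (PySem.Chars.splitOn s ['#']).any fun seg =>
    seg.length == n &&
    (List.range n).all fun i => (seg.getD i ' ' == w.getD i ' ' || seg.getD i ' ' == ' ')

def lineB (s : List Char) (ws : List (List Char)) (n : Nat) : Bool :=
  (PySem.List.pyRange 0 ((s.length : Int) - n + 1) 1).any fun i =>
    (decide (i = 0) || PySem.List.pyGetD s (i - 1) ' ' == '#') &&
    ((decide (i + n = (s.length : Int)) || PySem.List.pyGetD s (i + n) ' ' == '#') &&
    (ws.any fun w =>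
      (List.range n).all fun j =>
        let c := PySem.List.pyGetD s (i + (j : Int)) ' '
        c != '#' && (c == ' ' || c == w.getD j ' ')))

lemma lineA_iff (s : List Char) (ws : List (List Char)) (n : Nat) :
    lineA s ws n = true ↔ AOK s ws n := by
  simp [lineA, splitOn_eq_splitH, AOK, MA, List.any_eq_true, List.all_eq_true]

lemma lineB_iff (s : List Char) (ws : List (List Char)) (n : Nat) :
    lineB s ws n = true ↔ BOK s ws n := by
  rw [lineB, List.any_eq_true]
  constructor
  · rintro ⟨i, hi, hcond⟩
    rw [PySem.List.mem_pyRange_one] at hi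
    obtain ⟨h0, hlt⟩ := hi
    set k := i.toNat with hkdef
    have hik : i = (k : Int) := (Int.toNat_of_nonneg h0).symm
    rw [hik] at hcond hlt
    simp only [Bool.and_eq_true, Bool.or_eq_true, decide_eq_true_eq, beq_iff_eq,
      List.all_eq_true, List.any_eq_true, List.mem_range, bne_iff_ne] at hcond
    obtain ⟨hL, hR, w, hw, hM⟩ := hcond
    refine ⟨k, by omega, ?_, ?_, w, hw, fun j hj => ?_⟩
    · by_cases hk0 : k = 0
      · exact Or.inl hk0
      · rcases hL with hL | hL
        · omega
        · right
          have he : (k : Int) - 1 = ((k - 1 : Nat) : Int) := by omega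
          rwa [he, PySem.List.pyGetD_natCast] at hL
    · rcases hR with hR | hR
      · left; omega
      · right
        have he : (k : Int) + n = ((k + n : Nat) : Int) := by omega
        rwa [he, PySem.List.pyGetD_natCast] at hR
    · have := hM j hj
      have he : (k : Int) + (j : Int) = ((k + j : Nat) : Int) := by omega
      rwa [he, PySem.List.pyGetD_natCast] at this
  · rintro ⟨k, hk, hl, hr, w, hw, hm⟩
    refine ⟨(k : Int), PySem.List.mem_pyRange_one.mpr ⟨by omega, by omega⟩, ?_⟩
    simp only [Bool.and_eq_true, Bool.or_eq_true, decide_eq_true_eq, beq_iff_eq,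
      List.all_eq_true, List.any_eq_true, List.mem_range, bne_iff_ne]
    refine ⟨?_, ?_, w, hw, fun j hj => ?_⟩
    · by_cases hk0 : k = 0
      · left; omega
      · rcases hl with hl | hl
        · exact absurd hl hk0
        · right
          have he : (k : Int) - 1 = ((k - 1 : Nat) : Int) := by omega
          rw [he, PySem.List.pyGetD_natCast]; exact hl
    · rcases hr with hr | hr
      · left; omega
      · right
        have he : (k : Int) + n = ((k + n : Nat) : Int) := by omega
        rw [he, PySem.List.pyGetD_natCast]; exact hr
    · have he : (k : Int) + (j : Int) = ((k + j : Nat) : Int) := by omega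
      rw [he, PySem.List.pyGetD_natCast]
      exact hm j hj

lemma lineA_eq_lineB (s : List Char) (ws : List (List Char)) (n : Nat) :
    lineA s ws n = lineB s ws n := by
  have h := (lineA_iff s ws n).trans ((AOK_iff_BOK s ws n).trans (lineB_iff s ws n).symm)
  cases hA : lineA s ws n <;> cases hB : lineB s ws n <;> simp_all

lemma ports_eq (board : List (List String)) (word : String) :
    placeWordInCrossword2 board word = placeWordInCrossword2_alt board word := by
  rw [placeWordInCrossword2, placeWordInCrossword2_alt]
  change ([board, pvZipStar board].any fun Bd => Bd.any fun row =>
      lineA (pvJoinRow row) [word.toList, (PySem.List.slice? word.toList none none (-1)).getD []] word.toList.length)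
    = ((board.map pvJoinRow ++ (pvZipStar board).map pvJoinRow).any fun s =>
      lineB s [word.toList, (PySem.List.slice? word.toList none none (-1)).getD []] word.toList.length)
  simp only [List.any_cons, List.any_nil, Bool.or_false, List.any_append, List.any_map,
    Function.comp_def, lineA_eq_lineB]

-- ===== VERDICT (by name: the statement is the Claim_ definition above) =====
theorem placeWordInCrossword2_spec : Claim_equal_placeWordInCrossword2 := by
  intro board word _
  unfold Spec_placeWordInCrossword2
  exact ports_eq board word
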